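-- pv_equiv track=rewrite | github.com/MIMPython/MIMPython2022-Assignment | Assignment-week02/week02_student51_NguyenThiThang/week02_assignment08_student51_NguyenThiThang.py | veDauSao
-- ===== SOURCE A (Python) =====
-- def veDauSao(x):
--     str=""
--     for i in range(1,2*x):
--         if (i%2==0):
--             str=str+" "
--         else:
--             str=str+"*"
--     return str
-- ===== SOURCE B (Python) =====
-- def veDauSao(x):
--     return " ".join(["*"] * x)
-- ===== Notes on version B (the rewrite author's own statement) =====
-- stated objective: simpler
-- what changed: Replaces the per-index loop (2x-1 iterations with a parity test and string concatenation on each index) by the closed-form construction " ".join(["*"] * x): x stars joined by single spaces, with no index iteration at all.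
import Mathlib
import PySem

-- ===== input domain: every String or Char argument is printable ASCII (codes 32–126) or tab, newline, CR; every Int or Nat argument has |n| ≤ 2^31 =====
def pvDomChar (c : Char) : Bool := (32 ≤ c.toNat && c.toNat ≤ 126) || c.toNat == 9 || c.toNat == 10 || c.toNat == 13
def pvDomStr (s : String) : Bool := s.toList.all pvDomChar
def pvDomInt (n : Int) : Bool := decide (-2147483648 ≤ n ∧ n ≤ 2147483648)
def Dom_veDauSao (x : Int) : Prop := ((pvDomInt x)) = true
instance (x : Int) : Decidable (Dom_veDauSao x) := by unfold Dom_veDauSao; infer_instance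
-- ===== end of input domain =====

-- B replaces the index loop with a closed-form construction: x stars joined by single spaces (simpler).

-- ===== PORT A =====
-- A: build the string character by character over i in range(1, 2*x), space on even i, star on odd i.
def veDauSao (x : Int) : String :=
  (PySem.List.pyRange 1 (2 * x) 1).foldl
    (fun s i => if PySem.Int.mod i 2 = 0 then s ++ " " else s ++ "*") ""

-- ===== PORT B =====
-- B: " ".join(["*"] * x)
def veDauSao_alt (x : Int) : String :=
  PySem.Str.join " " (PySem.List.pyRepeat ["*"] x)

-- ===== PRECONDITION & SPEC =====
def Spec_veDauSao (x : Int) (out : String) : Prop := out = veDauSao_alt x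
instance (x : Int) (out : String) : Decidable (Spec_veDauSao x out) := by unfold Spec_veDauSao; infer_instance

-- ===== CLAIM (what is proved, stated in full; the proofs are below) =====
def Claim_equal_veDauSao : Prop := ∀ (x : Int), Dom_veDauSao x → Spec_veDauSao x (veDauSao x)

-- ===== LEMMAS AND PROOFS =====

-- the character list of x stars joined by single spaces
def pvJ (n : Nat) : List Char := PySem.Chars.join [' '] (List.replicate n ['*'])

theorem pvJ_succ_succ (n : Nat) : pvJ (n + 2) = pvJ (n + 1) ++ [' ', '*'] := by
  induction n with
  | zero => decide
  | succ m ih =>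
      have h1 : pvJ (m + 3) = ['*'] ++ [' '] ++ pvJ (m + 2) := by
        simp [pvJ, List.replicate_succ, PySem.Chars.join_cons_cons]
      have h2 : pvJ (m + 2) = ['*'] ++ [' '] ++ pvJ (m + 1) := by
        simp [pvJ, List.replicate_succ, PySem.Chars.join_cons_cons]
      calc pvJ (m + 3) = ['*'] ++ [' '] ++ pvJ (m + 2) := h1
        _ = ['*'] ++ [' '] ++ (pvJ (m + 1) ++ [' ', '*']) := by rw [ih]
        _ = (['*'] ++ [' '] ++ pvJ (m + 1)) ++ [' ', '*'] := by simp
        _ = pvJ (m + 2) ++ [' ', '*'] := by rw [← h2]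

theorem pvA_toList (n : Nat) : (veDauSao ((n : Int) + 1)).toList = pvJ (n + 1) := by
  induction n with
  | zero => decide
  | succ m ih =>
      have hsplit : PySem.List.pyRange 1 (2 * (((m : Int) + 1) + 1)) 1
          = PySem.List.pyRange 1 (2 * ((m : Int) + 1)) 1
            ++ PySem.List.pyRange (2 * ((m : Int) + 1)) (2 * (((m : Int) + 1) + 1)) 1 := by
        exact PySem.List.pyRange_one_append 1 (2 * ((m : Int) + 1)) _ (by omega) (by omega)
      have htail : PySem.List.pyRange (2 * ((m : Int) + 1)) (2 * (((m : Int) + 1) + 1)) 1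
          = [2 * ((m : Int) + 1), 2 * ((m : Int) + 1) + 1] := by
        rw [PySem.List.pyRange_one_cons (by omega), PySem.List.pyRange_one_cons (by omega),
            PySem.List.pyRange_one_eq_nil (by omega)]
      have hmod0 : PySem.Int.mod (2 * ((m : Int) + 1)) 2 = 0 := by
        rw [PySem.Int.mod_eq_emod_of_pos (by omega)]; omega
      have hmod1 : PySem.Int.mod (2 * ((m : Int) + 1) + 1) 2 = 1 := by
        rw [PySem.Int.mod_eq_emod_of_pos (by omega)]; omega
      have key : veDauSao ((m : Int) + 1 + 1)
          = List.foldl (fun s i => if PySem.Int.mod i 2 = 0 then s ++ " " else s ++ "*")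
              (veDauSao ((m : Int) + 1)) [2 * ((m : Int) + 1), 2 * ((m : Int) + 1) + 1] := by
        unfold veDauSao
        rw [hsplit, List.foldl_append, htail]
      show (veDauSao ((m : Int) + 1 + 1)).toList = pvJ (m + 2)
      rw [key]
      simp only [List.foldl_cons, List.foldl_nil, hmod0, hmod1]
      norm_num
      simp [ih, pvJ_succ_succ]

-- ===== VERDICT (by name: the statement is the Claim_ definition above) =====
theorem veDauSao_spec : Claim_equal_veDauSao := by
  intro x _
  unfold Spec_veDauSao veDauSao_alt
  by_cases hx : x ≤ 0
  · have hA : veDauSao x = "" := by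
      unfold veDauSao
      rw [PySem.List.pyRange_one_eq_nil (by omega)]
      rfl
    have hB : PySem.List.pyRepeat ["*"] x = [] := by
      rw [PySem.List.pyRepeat_singleton]
      simp [Int.toNat_of_nonpos hx]
    rw [hA, hB]
    apply String.toList_inj.mp
    simp [PySem.Str.toList_join, PySem.Chars.join_nil]
  · push Not at hx
    obtain ⟨n, rfl⟩ : ∃ n : Nat, x = (n : Int) + 1 := ⟨(x - 1).toNat, by omega⟩
    apply String.toList_inj.mp
    rw [pvA_toList]
    rw [PySem.List.pyRepeat_singleton]
    have : ((n : Int) + 1).toNat = n + 1 := by omega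
    rw [this, PySem.Str.toList_join]
    simp [pvJ, List.map_replicate]
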